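-- pv_equiv track=rewrite | github.com/trungnguyencs/Interview_Prep | Nutanix/BeautifulRow.py | beautiful_row
-- ===== SOURCE A (Python) =====
-- from bisect import bisect_left
--
-- def lis(arr):
-- 	stack = [arr[0]]
-- 	len_stack = 1
-- 	lis_arr = [1] * len(arr)
-- 	for i, num in enumerate(arr[1::]):
-- 		if stack and num > stack[-1]:
-- 			stack.append(num)
-- 			len_stack += 1
-- 		else:
-- 			idx = bisect_left(stack, num)
-- 			stack[idx] = num
-- 		lis_arr[i+1] = len_stack
-- 	return lis_arr
--
-- def beautiful_row(arr):
-- 	left_lis = lis(arr)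
-- 	right_lis = lis(arr[::-1])
-- 	right_lis = right_lis[::-1]
-- 	max_beautiful = 0
-- 	for i in range(len(arr)):
-- 		beautiful_len = left_lis[i] + right_lis[i] - 1
-- 		max_beautiful = max(max_beautiful, beautiful_len)
-- 	return len(arr) - max_beautiful
-- ===== SOURCE B (Python) =====
-- # Quadratic DP (longest-increasing-ending lengths + running max) instead of the
-- # patience/bisect pass; simpler, no bisect needed.
--
-- def _prefix_lis(arr):
--     # out[i] = length of the longest strictly increasing subsequence of arr[:i+1]
--     pairs = []  # (value, length of longest increasing subsequence ending at this value's position)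
--     run = 0
--     out = []
--     for num in arr:
--         e = 1 + max((e for v, e in pairs if v < num), default=0)
--         pairs.append((num, e))
--         run = max(run, e)
--         out.append(run)
--     return out
--
-- def beautiful_row(arr):
--     left = _prefix_lis(arr)
--     right = _prefix_lis(arr[::-1])[::-1]
--     best = 0
--     for i in range(len(arr)):
--         best = max(best, left[i] + right[i] - 1)
--     return len(arr) - best
-- ===== Notes on version B (the rewrite author's own statement) =====
-- stated objective: simpler
-- what changed: Replaced the patience-sorting/bisect prefix-LIS pass with a plain quadratic DP that keeps (value, longest-increasing-ending-length) pairs and a running maximum, so no bisect or in-place stack surgery is needed.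
import Mathlib
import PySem

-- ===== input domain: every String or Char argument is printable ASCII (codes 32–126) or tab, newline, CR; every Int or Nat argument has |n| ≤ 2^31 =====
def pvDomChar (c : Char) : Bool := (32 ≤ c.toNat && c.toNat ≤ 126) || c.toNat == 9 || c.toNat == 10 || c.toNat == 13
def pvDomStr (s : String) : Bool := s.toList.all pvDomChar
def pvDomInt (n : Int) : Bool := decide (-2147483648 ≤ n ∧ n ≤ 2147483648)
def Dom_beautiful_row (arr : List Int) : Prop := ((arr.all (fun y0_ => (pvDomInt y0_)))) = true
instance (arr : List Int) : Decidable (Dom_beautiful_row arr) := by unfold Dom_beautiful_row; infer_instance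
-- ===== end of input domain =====

-- B replaces A's patience-sorting/bisect prefix-LIS pass with a plain quadratic DP
-- over (value, ending-length) pairs plus a running maximum; objective: simpler.

-- ===== PORT A =====
-- One step of A's `lis` loop body; state = (stack, len_stack, lis_arr built so far).
-- `if stack and num > stack[-1]` = match on getLast?; the `none` branch mirrors the
-- else-branch (on an empty stack Python's assignment at index 0 would raise IndexError,
-- but the stack is nonempty throughout A's real executions, so it is never taken).
-- A builds lis_arr as [1]*n and assigns slot i+1 each iteration in order, which is
-- the same list as appending one value per iteration starting from [1].
def lisStepA (st : List Int × Int × List Int) (num : Int) : List Int × Int × List Int :=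
  match st with
  | (stack, lenStack, out) =>
    match stack.getLast? with
    | some l =>
      if num > l then (stack ++ [num], lenStack + 1, out ++ [lenStack + 1])
      else (PySem.List.pySetD stack ((PySem.List.bisectLeft stack num : Nat) : Int) num,
            lenStack, out ++ [lenStack])
    | none => (PySem.List.pySetD stack ((PySem.List.bisectLeft stack num : Nat) : Int) num,
            lenStack, out ++ [lenStack])

-- A's `lis`; on the empty list Python raises IndexError reading the first element (excluded by Pre_); here the result is the empty list.
def lisA (arr : List Int) : List Int :=
  match arr with
  | [] => []
  | a :: rest => (rest.foldl lisStepA ([a], 1, [1])).2.2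

-- arr[::-1] is List.reverse (exact).
def beautiful_row (arr : List Int) : Int :=
  let leftLis := lisA arr
  let rightLis := (lisA arr.reverse).reverse
  let maxBeautiful := (PySem.List.pyRange 0 (arr.length : Int) 1).foldl
    (fun mb i => max mb (PySem.List.pyGetD leftLis i 0 + PySem.List.pyGetD rightLis i 0 - 1)) 0
  (arr.length : Int) - maxBeautiful

-- ===== PORT B =====
-- max((e for v, e in pairs if v < num), default=0)
def maxEndLt (pairs : List (Int × Int)) (num : Int) : Int :=
  pairs.foldl (fun b ve => if ve.1 < num then max b ve.2 else b) 0

-- one iteration of _prefix_lis's loop; state = (pairs, run, out)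
def prefixLisStep (st : List (Int × Int) × Int × List Int) (num : Int) :
    List (Int × Int) × Int × List Int :=
  match st with
  | (pairs, run, out) =>
    let e := 1 + maxEndLt pairs num
    (pairs ++ [(num, e)], max run e, out ++ [max run e])

def prefixLis (arr : List Int) : List Int :=
  (arr.foldl prefixLisStep ([], 0, [])).2.2

def beautiful_row_alt (arr : List Int) : Int :=
  let left := prefixLis arr
  let right := (prefixLis arr.reverse).reverse
  let best := (PySem.List.pyRange 0 (arr.length : Int) 1).foldl
    (fun b i => max b (PySem.List.pyGetD left i 0 + PySem.List.pyGetD right i 0 - 1)) 0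
  (arr.length : Int) - best

-- ===== PRECONDITION & SPEC =====
-- Python A reads the first element up front and raises IndexError on the empty list; excluded.
def Pre_beautiful_row (arr : List Int) : Prop := arr ≠ []
instance (arr : List Int) : Decidable (Pre_beautiful_row arr) := by
  unfold Pre_beautiful_row; infer_instance

def pvWitness_beautiful_row : List Int := [2, 1, 4, 3]

def Spec_beautiful_row (arr : List Int) (out : Int) : Prop := out = beautiful_row_alt arr
instance (arr : List Int) (out : Int) : Decidable (Spec_beautiful_row arr out) := by
  unfold Spec_beautiful_row; infer_instance

-- ===== CLAIM (what is proved, stated in full; the proofs are below) =====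
def Claim_equal_beautiful_row : Prop := ∀ (arr : List Int), Dom_beautiful_row arr →
  Pre_beautiful_row arr → Spec_beautiful_row arr (beautiful_row arr)

-- ===== LEMMAS AND PROOFS =====

-- Coupling invariant between B's DP pairs and A's patience stack:
-- the stack is strictly increasing, every DP ending-length lies in [1, |stack|],
-- and stack[k] is the least value v with some pair (v, e), e ≥ k+1.
def Rinv (pairs : List (Int × Int)) (stack : List Int) : Prop :=
  stack ≠ [] ∧ List.Pairwise (· < ·) stack ∧
  (∀ ve ∈ pairs, 1 ≤ ve.2 ∧ ve.2 ≤ (stack.length : Int)) ∧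
  ∀ k (h : k < stack.length),
    (∃ ve ∈ pairs, ((k : Int) + 1 ≤ ve.2 ∧ ve.1 = stack[k])) ∧
    (∀ ve ∈ pairs, (k : Int) + 1 ≤ ve.2 → stack[k] ≤ ve.1)

lemma foldl_if_max_le (num c : Int) :
    ∀ (pairs : List (Int × Int)) (b : Int), b ≤ c →
    (∀ ve ∈ pairs, ve.1 < num → ve.2 ≤ c) →
    pairs.foldl (fun b ve => if ve.1 < num then max b ve.2 else b) b ≤ c := by
  intro pairs
  induction pairs with
  | nil => intro b hb _; simpa using hb
  | cons ve rest ih =>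
    intro b hb h
    simp only [List.foldl_cons]
    split
    · exact ih _ (max_le hb (h ve (by simp) ‹_›)) (fun u hu => h u (by simp [hu]))
    · exact ih _ hb (fun u hu => h u (by simp [hu]))

lemma le_foldl_if_max (num : Int) :
    ∀ (pairs : List (Int × Int)) (b : Int),
    b ≤ pairs.foldl (fun b ve => if ve.1 < num then max b ve.2 else b) b := by
  intro pairs
  induction pairs with
  | nil => simp
  | cons ve rest ih =>
    intro b
    simp only [List.foldl_cons]
    split
    · exact le_trans (le_max_left _ _) (ih _)
    · exact ih _

lemma mem_le_foldl_if_max (num : Int) :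
    ∀ (pairs : List (Int × Int)) (b : Int) (ve : Int × Int), ve ∈ pairs → ve.1 < num →
    ve.2 ≤ pairs.foldl (fun b ve => if ve.1 < num then max b ve.2 else b) b := by
  intro pairs
  induction pairs with
  | nil => simp
  | cons u rest ih =>
    intro b ve hmem hlt
    simp only [List.foldl_cons]
    rcases List.mem_cons.mp hmem with h | h
    · subst h
      rw [if_pos hlt]
      exact le_trans (le_max_right _ _) (le_foldl_if_max num rest _)
    · split
      · exact ih _ ve h hlt
      · exact ih _ ve h hlt

lemma step_couple (stack : List Int) (pairs : List (Int × Int)) (num : Int)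
    (out : List Int) (hR : Rinv pairs stack) :
    ∃ stack' pairs',
      lisStepA (stack, (stack.length : Int), out) num
        = (stack', (stack'.length : Int), out ++ [(stack'.length : Int)]) ∧
      prefixLisStep (pairs, (stack.length : Int), out) num
        = (pairs', (stack'.length : Int), out ++ [(stack'.length : Int)]) ∧
      Rinv pairs' stack' := by
  obtain ⟨hne, hpw, hbound, hmin⟩ := hR
  have hm : 0 < stack.length := List.length_pos_iff.mpr hne
  have hidx := List.pairwise_iff_getElem.mp hpw
  have hlast : stack.getLast? = some (stack[stack.length - 1]'(by omega)) := by
    rw [List.getLast?_eq_getElem?]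
    exact List.getElem?_eq_getElem (by omega)
  by_cases hcase : num > stack[stack.length - 1]'(by omega)
  case pos =>
    -- append case: the new ending length is stack.length + 1
    have hle : ∀ a ∈ stack, a ≤ stack[stack.length - 1]'(by omega) := by
      intro a ha
      obtain ⟨i, hi, rfl⟩ := List.mem_iff_getElem.mp ha
      rcases Nat.lt_or_ge i (stack.length - 1) with h | h
      · exact le_of_lt (hidx i (stack.length - 1) (by omega) (by omega) (by omega))
      · have : i = stack.length - 1 := by omega
        subst this; exact le_refl _
    have hmax : maxEndLt pairs num = (stack.length : Int) := by
      apply le_antisymm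
      · exact foldl_if_max_le num _ pairs 0 (by positivity)
          (fun ve hve _ => (hbound ve hve).2)
      · obtain ⟨⟨ve, hvemem, hvee, hveval⟩, _⟩ := hmin (stack.length - 1) (by omega)
        have h1 : ve.1 < num := by rw [hveval]; exact hcase
        have h2 := mem_le_foldl_if_max num pairs 0 ve hvemem h1
        have h3 : (stack.length : Int) ≤ ve.2 := by
          have h4 : ((stack.length - 1 : Nat) : Int) = (stack.length : Int) - 1 := by
            push_cast [hm]; omega
          omega
        exact le_trans h3 h2
    have hlen : (((stack ++ [num]).length : Nat) : Int) = (stack.length : Int) + 1 := by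
      simp
    have hmm : max (stack.length : Int) (1 + (stack.length : Int)) = (stack.length : Int) + 1 := by
      omega
    refine ⟨stack ++ [num], pairs ++ [(num, 1 + (stack.length : Int))], ?_, ?_, ?_⟩
    · rw [hlen]
      simp [lisStepA, hlast, if_pos hcase]
    · rw [hlen]
      show (pairs ++ [(num, 1 + maxEndLt pairs num)],
            max (stack.length : Int) (1 + maxEndLt pairs num),
            out ++ [max (stack.length : Int) (1 + maxEndLt pairs num)]) = _
      rw [hmax, hmm]
    · refine ⟨by simp, ?_, ?_, ?_⟩
      · rw [List.pairwise_append]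
        exact ⟨hpw, by simp, fun a ha b hb => by
          simp at hb; subst hb; exact lt_of_le_of_lt (hle a ha) hcase⟩
      · intro ve hve
        rcases List.mem_append.mp hve with h | h
        · have := hbound ve h; simp; omega
        · simp at h; subst h; simp; omega
      · intro k hk
        simp only [List.length_append, List.length_cons, List.length_nil] at hk
        rcases Nat.lt_or_ge k stack.length with hklt | hkge
        · -- k < stack.length : old level unchanged
          have hget : (stack ++ [num])[k]'(by simp; omega) = stack[k] :=
            List.getElem_append_left hklt
          obtain ⟨⟨ve, hvemem, hvee, hveval⟩, hminv⟩ := hmin k hklt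
          refine ⟨⟨ve, List.mem_append_left _ hvemem, hvee, by rw [hget, hveval]⟩, ?_⟩
          intro u hu hue
          rcases List.mem_append.mp hu with h | h
          · rw [hget]; exact hminv u h hue
          · simp at h; subst h
            rw [hget]
            exact le_of_lt (lt_of_le_of_lt (hle _ (List.getElem_mem hklt)) hcase)
        · -- k = stack.length : the new level
          have hkeq : k = stack.length := by omega
          subst hkeq
          have hget : (stack ++ [num])[stack.length]'(by simp) = num := by simp
          refine ⟨⟨(num, 1 + (stack.length : Int)), List.mem_append_right _ (by simp),
                   by push_cast; omega, by rw [hget]⟩, ?_⟩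
          intro u hu hue
          rcases List.mem_append.mp hu with h | h
          · exfalso; have := (hbound u h).2; omega
          · simp at h; subst h; rw [hget]
  case neg =>
    -- replace case: the stack cell at index bisectLeft is overwritten with num
    set t := PySem.List.bisectLeft stack num with ht
    obtain ⟨ht_le, hlt, hge⟩ := PySem.List.bisectLeft_spec stack num (hpw.imp le_of_lt)
    have htm : t < stack.length := by
      rcases Nat.lt_or_ge t stack.length with h | h
      · exact h
      · exact absurd (hlt (stack.length - 1) (by omega) (by omega)) hcase
    have hnumle : num ≤ stack[t]'htm := hge t htm (le_refl _)
    have htint : (t : Int) < (stack.length : Int) := by exact_mod_cast htm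
    have hmax : maxEndLt pairs num = (t : Int) := by
      apply le_antisymm
      · apply foldl_if_max_le num _ pairs 0 (by positivity)
        intro ve hve hlt'
        by_contra hcon
        have hvee : (t : Int) + 1 ≤ ve.2 := by omega
        have := (hmin t htm).2 ve hve hvee
        omega
      · rcases Nat.eq_zero_or_pos t with h0 | h0
        · rw [h0]; exact_mod_cast le_foldl_if_max num pairs 0
        · obtain ⟨⟨ve, hvemem, hvee, hveval⟩, _⟩ := hmin (t - 1) (by omega)
          have h1 : ve.1 < num := by rw [hveval]; exact hlt (t-1) (by omega) (by omega)
          have h2 := mem_le_foldl_if_max num pairs 0 ve hvemem h1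
          have h3 : (t : Int) ≤ ve.2 := by
            have : ((t - 1 : Nat) : Int) = (t : Int) - 1 := by push_cast [h0]; omega
            omega
          exact le_trans h3 h2
    have hlen : (((stack.set t num).length : Nat) : Int) = (stack.length : Int) := by simp
    have hmm : max (stack.length : Int) (1 + (t : Int)) = (stack.length : Int) := by omega
    refine ⟨stack.set t num, pairs ++ [(num, 1 + (t : Int))], ?_, ?_, ?_⟩
    · rw [hlen]
      simp only [lisStepA, hlast]
      rw [if_neg hcase, ← ht]
      simp
    · rw [hlen]
      show (pairs ++ [(num, 1 + maxEndLt pairs num)],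
            max (stack.length : Int) (1 + maxEndLt pairs num),
            out ++ [max (stack.length : Int) (1 + maxEndLt pairs num)]) = _
      rw [hmax, hmm]
    · refine ⟨by simp [← List.length_pos_iff]; omega, ?_, ?_, ?_⟩
      · rw [List.pairwise_iff_getElem]
        intro i j hi hj hij
        simp only [List.length_set] at hi hj
        rw [List.getElem_set, List.getElem_set]
        by_cases hit : t = i
        · subst hit
          rw [if_pos rfl, if_neg (by omega)]
          exact lt_of_le_of_lt hnumle (hidx t j htm hj hij)
        · rw [if_neg hit]
          by_cases hjt : t = j
          · subst hjt
            rw [if_pos rfl]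
            exact hlt i hi (by omega)
          · rw [if_neg hjt]
            exact hidx i j hi hj hij
      · intro ve hve
        rcases List.mem_append.mp hve with h | h
        · have := hbound ve h; simpa using this
        · simp at h; subst h; simp; omega
      · intro k hk
        simp only [List.length_set] at hk
        by_cases hkt : k = t
        · subst hkt
          refine ⟨⟨(num, 1 + (t : Int)), List.mem_append_right _ (by simp), by omega, ?_⟩, ?_⟩
          · rw [List.getElem_set, if_pos rfl]
          · intro u hu hue
            rw [List.getElem_set, if_pos rfl]
            rcases List.mem_append.mp hu with h | h
            · exact le_trans hnumle ((hmin t hk).2 u h hue)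
            · simp at h; subst h; simp
        · obtain ⟨⟨ve, hvemem, hvee, hveval⟩, hminv⟩ := hmin k hk
          refine ⟨⟨ve, List.mem_append_left _ hvemem, hvee, ?_⟩, ?_⟩
          · rw [List.getElem_set, if_neg (fun h => hkt h.symm), hveval]
          · intro u hu hue
            rw [List.getElem_set, if_neg (fun h => hkt h.symm)]
            rcases List.mem_append.mp hu with h | h
            · exact hminv u h hue
            · simp at h; subst h
              have hklt : k < t := by
                by_contra hcon
                push_cast at hue
                omega
              exact le_of_lt (hlt k hk hklt)

lemma master (rest : List Int) :
    ∀ (stack : List Int) (pairs : List (Int × Int)) (out : List Int),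
    Rinv pairs stack →
    (rest.foldl lisStepA (stack, (stack.length : Int), out)).2.2
      = (rest.foldl prefixLisStep (pairs, (stack.length : Int), out)).2.2 := by
  induction rest with
  | nil => intro stack pairs out _; rfl
  | cons num rest ih =>
    intro stack pairs out hR
    obtain ⟨stack', pairs', hA, hB, hR'⟩ := step_couple stack pairs num out hR
    simp only [List.foldl_cons, hA, hB]
    exact ih stack' pairs' _ hR'

lemma Rinv_init (a : Int) : Rinv [(a, 1)] [a] := by
  refine ⟨by simp, by simp, by simp, ?_⟩
  intro k hk
  have hk0 : k = 0 := by simpa using hk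
  subst hk0
  exact ⟨⟨(a, 1), by simp⟩, by simp⟩

lemma lis_eq_prefixLis (arr : List Int) (h : arr ≠ []) : lisA arr = prefixLis arr := by
  match arr with
  | a :: rest =>
    show (rest.foldl lisStepA ([a], 1, [1])).2.2 = _
    have h1 : prefixLis (a :: rest) = (rest.foldl prefixLisStep ([(a, 1)], 1, [1])).2.2 := by
      simp [prefixLis, prefixLisStep, maxEndLt]
    rw [h1]
    have := master rest [a] [(a, 1)] [1] (Rinv_init a)
    simpa using this

-- ===== VERDICT (by name: the statement is the Claim_ definition above) =====
theorem beautiful_row_spec : Claim_equal_beautiful_row := by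
  intro arr _ hpre
  unfold Spec_beautiful_row beautiful_row beautiful_row_alt
  rw [lis_eq_prefixLis arr hpre,
      lis_eq_prefixLis arr.reverse (by simpa using hpre)]
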